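-- pv_equiv track=rewrite | github.com/tiziano777/SFT-data-Forge | utils/extract_glob.py | _is_huggingface_cache
-- ===== SOURCE A (Python) =====
-- import fnmatch
--
-- def _is_huggingface_cache(glob_pattern: str) -> bool:
--     """Verifica se il pattern si riferisce a cache di Hugging Face"""
--     cache_patterns = [
--         '.cache/huggingface/*',
--         '.cache/huggingface/**/*',
--         '**/.cache/**/*',
--         '**/*.lock',
--         '**/*.metadata'
--     ]
--
--     glob_lower = glob_pattern.lower()
--
--     # Controlla pattern espliciti di cache
--     if any(fnmatch.fnmatch(glob_lower, pattern) for pattern in cache_patterns):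
--         return True
--
--     # Controlla se contiene ".cache" in qualsiasi parte del path
--     if '.cache' in glob_lower:
--         return True
--
--     # Controlla file di lock e metadata
--     if glob_lower.endswith('.lock') or glob_lower.endswith('.metadata'):
--         return True
--
--     return False
-- ===== SOURCE B (Python) =====
-- def _is_huggingface_cache(glob_pattern: str) -> bool:
--     """Verifica se il pattern si riferisce a cache di Hugging Face"""
--     g = glob_pattern.lower()
--     return '.cache' in g or g.endswith('.lock') or g.endswith('.metadata')
-- ===== Notes on version B (the rewrite author's own statement) =====
-- stated objective: simpler
-- what changed: Dropped the fnmatch pattern list and its any-loop entirely: every glob pattern A tests is subsumed by the substring and suffix checks A performs afterwards anyway (fnmatch's '*' matches '/'), so B is a single boolean expression with no glob matching.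
import Mathlib
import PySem

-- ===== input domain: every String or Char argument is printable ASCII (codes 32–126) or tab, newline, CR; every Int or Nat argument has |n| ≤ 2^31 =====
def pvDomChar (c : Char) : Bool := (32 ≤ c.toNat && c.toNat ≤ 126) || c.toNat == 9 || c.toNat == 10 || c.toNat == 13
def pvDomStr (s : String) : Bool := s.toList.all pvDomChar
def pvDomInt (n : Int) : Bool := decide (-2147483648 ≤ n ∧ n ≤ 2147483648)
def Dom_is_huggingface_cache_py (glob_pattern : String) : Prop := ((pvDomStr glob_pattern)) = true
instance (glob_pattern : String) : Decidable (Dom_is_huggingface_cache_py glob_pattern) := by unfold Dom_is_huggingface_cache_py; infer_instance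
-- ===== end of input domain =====

-- B drops A's fnmatch pattern list and any-loop: the patterns are all subsumed by the
-- '.cache' substring and '.lock'/'.metadata' suffix checks, so B is one boolean expression (simpler).

-- ===== PORT A =====
-- Hand-written port of fnmatch.fnmatch restricted to patterns made of literal chars and '*'
-- (exact for A's five patterns: they contain no '?', '[' or ']'; '*' matches any sequence,
-- including '/': fnmatch does not treat path separators specially).
def pvFnmatch : List Char → List Char → Bool
  | [], s => s.isEmpty
  | c :: p, s =>
    if c = '*' then
      pvFnmatch p s ||
        (match s with
         | [] => false
         | _ :: t => pvFnmatch (c :: p) t)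
    else
      match s with
      | [] => false
      | x :: t => c = x && pvFnmatch p t
termination_by p s => (s.length, p.length)

def pvCachePatterns : List String :=
  [".cache/huggingface/*", ".cache/huggingface/**/*", "**/.cache/**/*", "**/*.lock", "**/*.metadata"]

def is_huggingface_cache_py (glob_pattern : String) : Bool :=
  let glob_lower := PySem.Str.lower glob_pattern
  if pvCachePatterns.any (fun pattern => pvFnmatch pattern.toList glob_lower.toList) then
    true
  else if PySem.Str.isIn ".cache" glob_lower then
    true
  else if PySem.Str.endswith glob_lower ".lock" || PySem.Str.endswith glob_lower ".metadata" then
    true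
  else
    false

-- ===== PORT B =====
def is_huggingface_cache_py_alt (glob_pattern : String) : Bool :=
  let g := PySem.Str.lower glob_pattern
  PySem.Str.isIn ".cache" g || PySem.Str.endswith g ".lock" || PySem.Str.endswith g ".metadata"

-- ===== PRECONDITION & SPEC =====
def Spec_is_huggingface_cache_py (glob_pattern : String) (out : Bool) : Prop := out = is_huggingface_cache_py_alt glob_pattern
instance (glob_pattern : String) (out : Bool) : Decidable (Spec_is_huggingface_cache_py glob_pattern out) := by unfold Spec_is_huggingface_cache_py; infer_instance

-- ===== CLAIM (what is proved, stated in full; the proofs are below) =====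
def Claim_equal_is_huggingface_cache_py : Prop := ∀ (glob_pattern : String), Dom_is_huggingface_cache_py glob_pattern → Spec_is_huggingface_cache_py glob_pattern (is_huggingface_cache_py glob_pattern)

-- ===== LEMMAS AND PROOFS =====

theorem pvFnmatch_nil (s : List Char) (h : pvFnmatch [] s = true) : s = [] := by
  cases s <;> simp [pvFnmatch] at h ⊢

theorem pvFnmatch_star (p : List Char) (s : List Char)
    (h : pvFnmatch ('*' :: p) s = true) : ∃ t, t <:+ s ∧ pvFnmatch p t = true := by
  induction s with
  | nil =>
    refine ⟨[], List.suffix_refl _, ?_⟩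
    simpa [pvFnmatch] using h
  | cons x xs ih =>
    rw [pvFnmatch, if_pos rfl] at h
    rcases Bool.or_eq_true_iff.mp h with h | h
    · exact ⟨x :: xs, List.suffix_refl _, h⟩
    · obtain ⟨t, ht, hp⟩ := ih h
      exact ⟨t, ht.trans (List.suffix_cons x xs), hp⟩

theorem pvFnmatch_lit (l p : List Char) (hl : '*' ∉ l) (s : List Char)
    (h : pvFnmatch (l ++ p) s = true) : ∃ t, s = l ++ t ∧ pvFnmatch p t = true := by
  induction l generalizing s with
  | nil => exact ⟨s, rfl, h⟩
  | cons c cs ih =>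
    have hc : c ≠ '*' := fun hc => hl (hc ▸ List.mem_cons_self)
    cases s with
    | nil => rw [List.cons_append, pvFnmatch, if_neg hc] at h; exact absurd h (by simp)
    | cons x xs =>
      rw [List.cons_append, pvFnmatch, if_neg hc] at h
      obtain ⟨hcx, h⟩ := Bool.and_eq_true_iff.mp h
      obtain ⟨t, rfl, hp⟩ := ih (fun hm => hl (List.mem_cons_of_mem _ hm)) xs h
      exact ⟨t, by simp [show c = x from by simpa using hcx], hp⟩

theorem pvFnmatch_litOnly (l : List Char) (hl : '*' ∉ l) (s : List Char)
    (h : pvFnmatch l s = true) : s = l := by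
  obtain ⟨t, rfl, ht⟩ := pvFnmatch_lit l [] hl s (by simpa using h)
  simp [pvFnmatch_nil _ ht]

-- a '.cache/huggingface/'-prefixed pattern forces '.cache' as a substring
theorem pat_prefix (p s : List Char)
    (h : pvFnmatch (['.','c','a','c','h','e','/','h','u','g','g','i','n','g','f','a','c','e','/'] ++ p) s = true) :
    ['.','c','a','c','h','e'] <:+: s := by
  obtain ⟨t, rfl, -⟩ := pvFnmatch_lit _ p (by decide) s h
  exact ⟨[], ['/','h','u','g','g','i','n','g','f','a','c','e','/'] ++ t, by simp⟩

-- '**/.cache/**/*' forces '.cache' as a substring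
theorem pat_mid (s : List Char)
    (h : pvFnmatch ('*' :: '*' :: (['/','.','c','a','c','h','e','/'] ++ ['*','*','/','*'])) s = true) :
    ['.','c','a','c','h','e'] <:+: s := by
  obtain ⟨t1, ht1, h1⟩ := pvFnmatch_star _ s h
  obtain ⟨t2, ht2, h2⟩ := pvFnmatch_star _ t1 h1
  obtain ⟨t3, rfl, -⟩ := pvFnmatch_lit ['/','.','c','a','c','h','e','/'] ['*','*','/','*'] (by decide) t2 h2
  have hm : ['.','c','a','c','h','e'] <:+: ['/','.','c','a','c','h','e','/'] ++ t3 :=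
    ⟨['/'], ['/'] ++ t3, by simp⟩
  exact hm.trans (ht2.isInfix.trans ht1.isInfix)

-- '**/*<lit>' forces the literal suffix <lit>
theorem pat_suffix (lit : List Char) (hl : '*' ∉ lit) (s : List Char)
    (h : pvFnmatch ('*' :: '*' :: '/' :: '*' :: lit) s = true) : lit <:+ s := by
  obtain ⟨t1, ht1, h1⟩ := pvFnmatch_star _ s h
  obtain ⟨t2, ht2, h2⟩ := pvFnmatch_star _ t1 h1
  obtain ⟨t3, rfl, h3⟩ := pvFnmatch_lit ['/'] ('*' :: lit) (by decide) t2 h2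
  obtain ⟨t4, ht4, h4⟩ := pvFnmatch_star lit t3 h3
  have ht5 := pvFnmatch_litOnly lit hl t4 h4
  subst ht5
  exact ((ht4.trans (List.suffix_cons '/' t3)).trans ht2).trans ht1

-- any of A's five patterns matching implies one of B's simple checks (on the same lowered string)
theorem anyMatch_implies (g : String)
    (h : pvCachePatterns.any (fun pattern => pvFnmatch pattern.toList g.toList) = true) :
    (PySem.Str.isIn ".cache" g || PySem.Str.endswith g ".lock" || PySem.Str.endswith g ".metadata") = true := by
  simp only [pvCachePatterns, List.any_cons, List.any_nil, Bool.or_false, Bool.or_eq_true] at h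
  simp only [Bool.or_eq_true, PySem.Str.isIn_eq, PySem.Str.endswith_eq,
    PySem.Chars.isIn_iff_infix, PySem.Chars.endswith_iff]
  have ec : ".cache".toList = ['.','c','a','c','h','e'] := by decide
  rcases h with h | h | h | h | h
  · rw [show ".cache/huggingface/*".toList =
        ['.','c','a','c','h','e','/','h','u','g','g','i','n','g','f','a','c','e','/'] ++ ['*'] from by decide] at h
    exact Or.inl (Or.inl (ec ▸ pat_prefix _ _ h))
  · rw [show ".cache/huggingface/**/*".toList =
        ['.','c','a','c','h','e','/','h','u','g','g','i','n','g','f','a','c','e','/'] ++ ['*','*','/','*'] from by decide] at h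
    exact Or.inl (Or.inl (ec ▸ pat_prefix _ _ h))
  · rw [show "**/.cache/**/*".toList =
        '*' :: '*' :: (['/','.','c','a','c','h','e','/'] ++ ['*','*','/','*']) from by decide] at h
    exact Or.inl (Or.inl (ec ▸ pat_mid _ h))
  · rw [show "**/*.lock".toList = '*' :: '*' :: '/' :: '*' :: ['.','l','o','c','k'] from by decide] at h
    have := pat_suffix ['.','l','o','c','k'] (by decide) _ h
    exact Or.inl (Or.inr (by rw [show ".lock".toList = ['.','l','o','c','k'] from by decide]; exact this))
  · rw [show "**/*.metadata".toList = '*' :: '*' :: '/' :: '*' :: ['.','m','e','t','a','d','a','t','a'] from by decide] at h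
    have := pat_suffix ['.','m','e','t','a','d','a','t','a'] (by decide) _ h
    exact Or.inr (by rw [show ".metadata".toList = ['.','m','e','t','a','d','a','t','a'] from by decide]; exact this)

-- ===== VERDICT (by name: the statement is the Claim_ definition above) =====
theorem is_huggingface_cache_py_spec : Claim_equal_is_huggingface_cache_py := by
  intro g _
  unfold Spec_is_huggingface_cache_py
  show is_huggingface_cache_py g = is_huggingface_cache_py_alt g
  simp only [is_huggingface_cache_py, is_huggingface_cache_py_alt]
  generalize PySem.Str.lower g = gl
  by_cases hm : pvCachePatterns.any (fun pattern => pvFnmatch pattern.toList gl.toList) = true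
  · have hb := anyMatch_implies gl hm
    simp only [hm, if_true, hb]
  · simp only [Bool.not_eq_true] at hm
    simp only [hm, Bool.false_eq_true, if_false]
    cases h1 : PySem.Str.isIn ".cache" gl <;>
      cases h2 : PySem.Str.endswith gl ".lock" <;>
        cases h3 : PySem.Str.endswith gl ".metadata" <;> simp
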